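-- pv_equiv track=rewrite | github.com/appleweiping/uncertainty-llm4rec | src/llm4rec/methods/preference_fusion.py | merge_panel_order_into_full_ranking
-- ===== SOURCE A (Python) =====
-- def merge_panel_order_into_full_ranking(
--     full_fallback_order: list[str],
--     panel_ids: list[str],
--     fused_panel_order: list[str],
-- ) -> list[str]:
--     """Replace positions of panel items with fused_panel_order; preserve non-panel positions."""
--     panel_set = set(panel_ids)
--     positions = sorted(i for i, v in enumerate(full_fallback_order) if v in panel_set)
--     if len(positions) != len(fused_panel_order):
--         fused_panel_order = list(fused_panel_order)[: len(positions)]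
--     out = list(full_fallback_order)
--     for j, pos in enumerate(positions):
--         if j < len(fused_panel_order):
--             out[pos] = fused_panel_order[j]
--     return out
-- ===== SOURCE B (Python) =====
-- def merge_panel_order_into_full_ranking(
--     full_fallback_order: list[str],
--     panel_ids: list[str],
--     fused_panel_order: list[str],
-- ) -> list[str]:
--     """Replace positions of panel items with fused_panel_order; preserve non-panel positions."""
--     panel_set = set(panel_ids)
--     it = iter(fused_panel_order)
--     sentinel = object()
--     out = []
--     for v in full_fallback_order:
--         if v in panel_set:
--             f = next(it, sentinel)
--             out.append(v if f is sentinel else f)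
--         else:
--             out.append(v)
--     return out
-- ===== Notes on version B (the rewrite author's own statement) =====
-- stated objective: simpler
-- what changed: A computes the sorted list of panel-item positions, truncates the fused list to match, and writes fused items into a copy by index; B does a single left-to-right pass over the ranking, consuming the next fused item (iterator + sentinel) at each panel position and keeping every other value, with no positions list, no sort and no index arithmetic.
import Mathlib
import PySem

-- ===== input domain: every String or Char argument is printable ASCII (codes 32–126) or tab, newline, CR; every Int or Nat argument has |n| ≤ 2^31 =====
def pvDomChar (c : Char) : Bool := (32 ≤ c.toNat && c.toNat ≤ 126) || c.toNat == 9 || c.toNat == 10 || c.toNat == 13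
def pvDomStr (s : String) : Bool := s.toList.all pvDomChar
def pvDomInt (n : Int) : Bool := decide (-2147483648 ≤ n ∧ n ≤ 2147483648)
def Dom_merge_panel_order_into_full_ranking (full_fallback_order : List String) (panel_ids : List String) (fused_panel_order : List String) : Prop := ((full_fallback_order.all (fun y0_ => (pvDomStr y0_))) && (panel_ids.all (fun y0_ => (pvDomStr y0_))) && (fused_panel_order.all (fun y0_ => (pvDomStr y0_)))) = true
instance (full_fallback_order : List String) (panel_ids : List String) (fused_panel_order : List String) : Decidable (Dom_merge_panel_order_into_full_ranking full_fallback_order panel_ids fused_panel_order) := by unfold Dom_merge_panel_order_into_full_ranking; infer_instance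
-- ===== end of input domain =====

-- B replaces A's index bookkeeping (positions list, sort, truncation, positional writes) by a single
-- left-to-right pass that consumes the fused items as it meets panel positions — simpler, same result.

-- ===== PORT A =====
-- literal transliteration of A: panel set, sorted list of panel positions, truncation, positional writes.
def merge_panel_order_into_full_ranking (full_fallback_order : List String) (panel_ids : List String) (fused_panel_order : List String) : List String :=
  let panel_set := PySem.Set.ofList panel_ids
  let positions := PySem.List.sorted
    (((PySem.List.enumerate full_fallback_order).filter (fun p => PySem.Set.contains panel_set p.2)).map (·.1))
    (fun x => x) false
  -- fused_panel_order[: len(positions)] : slice [:n] with n = a list length (≥ 0) is exactly List.take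
  let fused' := if positions.length ≠ fused_panel_order.length
                then fused_panel_order.take positions.length else fused_panel_order
  (PySem.List.enumerate positions).foldl
    (fun out jp =>
      if jp.1 < (fused'.length : Int)
      then PySem.List.pySetD out jp.2 (PySem.List.pyGetD fused' jp.1 "")   -- both indices in range, so exact
      else out)
    full_fallback_order

-- ===== PORT B =====
-- B's single pass: walk the full order, consuming fused items at panel positions (iterator + sentinel in Source B).
def pvAltGo (panel_set : PySem.Set String) : List String → List String → List String
  | [], _ => []
  | v :: rest, fused =>
    if PySem.Set.contains panel_set v then
      match fused with
      | f :: fs => f :: pvAltGo panel_set rest fs        -- next(it) succeeded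
      | []      => v :: pvAltGo panel_set rest []        -- iterator exhausted: keep original value
    else
      v :: pvAltGo panel_set rest fused

def merge_panel_order_into_full_ranking_alt (full_fallback_order : List String) (panel_ids : List String) (fused_panel_order : List String) : List String :=
  pvAltGo (PySem.Set.ofList panel_ids) full_fallback_order fused_panel_order

-- ===== PRECONDITION & SPEC =====
def Spec_merge_panel_order_into_full_ranking (full_fallback_order : List String) (panel_ids : List String) (fused_panel_order : List String) (out : List String) : Prop := out = merge_panel_order_into_full_ranking_alt full_fallback_order panel_ids fused_panel_order
instance (full_fallback_order : List String) (panel_ids : List String) (fused_panel_order : List String) (out : List String) : Decidable (Spec_merge_panel_order_into_full_ranking full_fallback_order panel_ids fused_panel_order out) := by unfold Spec_merge_panel_order_into_full_ranking; infer_instance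

-- ===== CLAIM (what is proved, stated in full; the proofs are below) =====
def Claim_equal_merge_panel_order_into_full_ranking : Prop := ∀ (full_fallback_order : List String) (panel_ids : List String) (fused_panel_order : List String), Dom_merge_panel_order_into_full_ranking full_fallback_order panel_ids fused_panel_order → Spec_merge_panel_order_into_full_ranking full_fallback_order panel_ids fused_panel_order (merge_panel_order_into_full_ranking full_fallback_order panel_ids fused_panel_order)

-- ===== LEMMAS AND PROOFS =====

-- panel positions of `l` when enumeration starts at `s` (A's generator expression, pre-sort)
def pvPos (S : PySem.Set String) (s : Int) (l : List String) : List Int :=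
  ((PySem.List.enumerate l s).filter (fun p => PySem.Set.contains S p.2)).map (·.1)

-- A's write loop as structural recursion over (positions, values)
def pvUpd : List String → List Int → List String → List String
  | out, p :: ps, f :: fs => pvUpd (PySem.List.pySetD out p f) ps fs
  | out, _, _ => out

theorem pvUpd_nil_vals (out : List String) (ps : List Int) : pvUpd out ps [] = out := by
  cases ps <;> rfl

theorem pvPos_cons (S : PySem.Set String) (s : Int) (v : String) (l : List String) :
    pvPos S s (v :: l) =
      if PySem.Set.contains S v then s :: pvPos S (s + 1) l else pvPos S (s + 1) l := by
  unfold pvPos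
  rw [PySem.List.enumerate_cons]
  by_cases h : PySem.Set.contains S v
  · have h' : v ∈ S := by simpa using h
    rw [if_pos h]
    simp [h']
  · have h' : ¬ v ∈ S := by simpa using h
    rw [if_neg h]
    simp [h']

theorem pvPos_shift (S : PySem.Set String) (s : Int) (l : List String) :
    pvPos S s l = (pvPos S 0 l).map (· + s) := by
  induction l generalizing s with
  | nil => rfl
  | cons v l ih =>
    rw [pvPos_cons, pvPos_cons, ih (s + 1), ih (0 + 1)]
    have hm : ∀ Q : List Int, (Q.map (· + (0 + 1))).map (· + s) = Q.map (· + (s + 1)) := by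
      intro Q
      rw [List.map_map]
      apply List.map_congr_left
      intro x _
      simp only [Function.comp_apply]
      omega
    split_ifs with h
    · simp only [List.map_cons]
      rw [hm]
      norm_num
    · rw [hm]

theorem pvPos_cons0 (S : PySem.Set String) (v : String) (l : List String) :
    pvPos S 0 (v :: l) =
      if PySem.Set.contains S v then 0 :: (pvPos S 0 l).map (· + 1)
      else (pvPos S 0 l).map (· + 1) := by
  rw [pvPos_cons, pvPos_shift S (0 + 1) l]
  norm_num

theorem pvPos_nonneg (S : PySem.Set String) (l : List String) :
    ∀ p ∈ pvPos S 0 l, 0 ≤ p := by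
  induction l with
  | nil => simp [pvPos]
  | cons v l ih =>
    rw [pvPos_cons0]
    intro p hp
    split_ifs at hp with h
    · simp only [List.mem_cons, List.mem_map] at hp
      rcases hp with rfl | ⟨q, hq, rfl⟩
      · omega
      · have := ih q hq; omega
    · simp only [List.mem_map] at hp
      rcases hp with ⟨q, hq, rfl⟩
      have := ih q hq; omega

theorem pvPos_pairwise (S : PySem.Set String) (l : List String) :
    (pvPos S 0 l).Pairwise (· < ·) := by
  induction l with
  | nil => simp [pvPos]
  | cons v l ih =>
    rw [pvPos_cons0]
    have hmap : ((pvPos S 0 l).map (· + 1)).Pairwise (· < ·) :=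
      ih.map _ (fun a b h => by omega)
    split_ifs with h
    · refine List.Pairwise.cons ?_ hmap
      intro p hp
      simp only [List.mem_map] at hp
      rcases hp with ⟨q, hq, rfl⟩
      have := pvPos_nonneg S l q hq
      omega
    · exact hmap

-- sorted(positions) = positions, since they are strictly increasing
theorem pvSorted_pos (S : PySem.Set String) (l : List String) :
    PySem.List.sorted (pvPos S 0 l) (fun x => x) false = pvPos S 0 l :=
  PySem.List.sorted_eq_of_perm_of_pairwise_lt _ _ (fun x => x)
    (List.Perm.refl _) (pvPos_pairwise S l)

-- A's truncation branch is unconditionally `take`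
theorem pvTrunc (n : Nat) (fs : List String) :
    (if n ≠ fs.length then fs.take n else fs) = fs.take n := by
  split_ifs with h
  · rfl
  · simp at h
    subst h
    simp

-- setting index 0
theorem pvSetD_zero (v f : String) (rest : List String) :
    PySem.List.pySetD (v :: rest) 0 f = f :: rest := by
  simp [PySem.List.pySetD, PySem.List.pySet?, PySem.List.pyIdx?]

-- setting a shifted index
theorem pvSetD_succ (v f : String) (rest : List String) (q : Int) (hq : 0 ≤ q) :
    PySem.List.pySetD (v :: rest) (q + 1) f = v :: PySem.List.pySetD rest q f := by
  simp only [PySem.List.pySetD, PySem.List.pySet?, PySem.List.pyIdx?]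
  rw [if_pos (by omega : (0:Int) ≤ q + 1), if_pos hq]
  by_cases h : q < (rest.length : Int)
  · rw [if_pos (by simp; omega), if_pos h]
    simp only [Option.map_some, Option.getD_some]
    have ht : (q + 1).toNat = q.toNat + 1 := by omega
    rw [ht]
    rfl
  · rw [if_neg (by simp; omega), if_neg h]
    simp

-- updating at shifted positions leaves the head alone
theorem pvUpd_shift (v : String) (rest : List String) (ps : List Int) (fs : List String)
    (hps : ∀ p ∈ ps, 0 ≤ p) :
    pvUpd (v :: rest) (ps.map (· + 1)) fs = v :: pvUpd rest ps fs := by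
  induction ps generalizing v rest fs with
  | nil => cases fs <;> rfl
  | cons p ps ih =>
    cases fs with
    | nil => rfl
    | cons f fs =>
      simp only [List.map_cons, pvUpd]
      rw [pvSetD_succ v f rest p (hps p (.head _)), ih]
      intro q hq
      exact hps q (.tail _ hq)

-- once the value index passes the end of F, the loop changes nothing
theorem pvFold_noop (F : List String) (ps : List Int) (out : List String) (j : Int)
    (hj : (F.length : Int) ≤ j) :
    (PySem.List.enumerate ps j).foldl
      (fun out jp =>
        if jp.1 < (F.length : Int)
        then PySem.List.pySetD out jp.2 (PySem.List.pyGetD F jp.1 "")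
        else out) out = out := by
  induction ps generalizing j with
  | nil => simp
  | cons p ps ih =>
    rw [PySem.List.enumerate_cons]
    simp only [List.foldl_cons]
    rw [if_neg (by omega)]
    exact ih (j + 1) (by omega)

-- A's foldl over the enumerated positions is pvUpd on the remaining values
theorem pvFold_eq_upd (F : List String) (ps : List Int) (out : List String) (j : Int)
    (hj : 0 ≤ j) :
    (PySem.List.enumerate ps j).foldl
      (fun out jp =>
        if jp.1 < (F.length : Int)
        then PySem.List.pySetD out jp.2 (PySem.List.pyGetD F jp.1 "")
        else out) out
    = pvUpd out ps (F.drop j.toNat) := by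
  induction ps generalizing out j with
  | nil => simp [pvUpd]
  | cons p ps ih =>
    rw [PySem.List.enumerate_cons]
    simp only [List.foldl_cons]
    by_cases h : j < (F.length : Int)
    · have hlt : j.toNat < F.length := by omega
      have hdrop : F.drop j.toNat = F[j.toNat] :: F.drop (j.toNat + 1) :=
        List.drop_eq_getElem_cons hlt
      have hget : PySem.List.pyGetD F j "" = F[j.toNat] :=
        PySem.List.pyGetD_eq_getElem F "" hj h
      rw [if_pos h, hget, hdrop]
      simp only [pvUpd]
      rw [ih _ (j + 1) (by omega)]
      have ht : (j + 1).toNat = j.toNat + 1 := by omega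
      rw [ht]
    · have hdrop : F.drop j.toNat = [] := List.drop_eq_nil_of_le (by omega)
      rw [if_neg h, hdrop, pvUpd_nil_vals]
      exact pvFold_noop F ps out (j + 1) (by omega)

-- B consumes nothing once the fused list is exhausted
theorem pvAltGo_nil (S : PySem.Set String) (l : List String) : pvAltGo S l [] = l := by
  induction l with
  | nil => rfl
  | cons v l ih => simp only [pvAltGo]; split_ifs <;> simp [ih]

-- the heart: A's positional update equals B's single pass
theorem pvMain (S : PySem.Set String) (full fused : List String) :
    pvUpd full (pvPos S 0 full) (fused.take (pvPos S 0 full).length) = pvAltGo S full fused := by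
  induction full generalizing fused with
  | nil => cases fused <;> rfl
  | cons v rest ih =>
    rw [pvPos_cons0]
    by_cases h : PySem.Set.contains S v
    · rw [if_pos h]
      cases fused with
      | nil =>
        simp only [List.take_nil, pvUpd_nil_vals, pvAltGo, if_pos h]
        rw [pvAltGo_nil]
      | cons f fs =>
        simp only [List.length_cons, List.length_map, List.take_succ_cons, pvUpd]
        rw [pvSetD_zero, pvUpd_shift f rest _ _ (pvPos_nonneg S rest)]
        simp only [pvAltGo, if_pos h]
        rw [← ih fs]
    · rw [if_neg h]
      simp only [List.length_map]
      rw [pvUpd_shift v rest _ _ (pvPos_nonneg S rest)]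
      simp only [pvAltGo, if_neg h]
      rw [← ih fused]

-- ===== VERDICT (by name: the statement is the Claim_ definition above) =====
theorem merge_panel_order_into_full_ranking_spec : Claim_equal_merge_panel_order_into_full_ranking := by
  intro full panel fused _
  unfold Spec_merge_panel_order_into_full_ranking
  simp only [merge_panel_order_into_full_ranking, merge_panel_order_into_full_ranking_alt]
  rw [show (((PySem.List.enumerate full).filter
        (fun p => PySem.Set.contains (PySem.Set.ofList panel) p.2)).map (·.1))
      = pvPos (PySem.Set.ofList panel) 0 full from rfl]
  rw [pvSorted_pos, pvFold_eq_upd _ _ _ 0 le_rfl]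
  simp only [Int.toNat_zero, List.drop_zero]
  rw [pvTrunc, pvMain]
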